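-- pv_equiv track=rewrite | github.com/wntpdnjs/Baejoon_prac | 프로그래머스/2/389479. 서버 증설 횟수/서버 증설 횟수.py | solution
-- ===== SOURCE A (Python) =====
-- def solution(players, m, k):
--     server = [m] * (24+k)
--     sum = 0
--     answer = 0
--
--     for i in range (len(players)):
--         while( server[i] <= players[i] ):
--             for j in range(i,i+k) :
--                 server[j] += m
--             sum += 1
--
--     answer = sum
--     return answer
-- ===== SOURCE B (Python) =====
-- def solution(players, m, k):
--     # One pass: per slot compute the needed scale-ups by floor division,
--     # subtracting the scale-ups of the previous k-1 slots that still cover it.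
--     adds = []
--     total = 0
--     for i, p in enumerate(players):
--         lo = i - k + 1
--         if lo < 0:
--             lo = 0
--         cover = sum(adds[lo:i])
--         a = p // m - cover
--         if a < 0:
--             a = 0
--         adds.append(a)
--         total += a
--     return total
-- ===== Notes on version B (the rewrite author's own statement) =====
-- stated objective: faster
-- what changed: Replaces A's simulation that repeatedly adds m to a server array until each slot's capacity exceeds the load by a single pass computing each slot's needed scale-up count via floor division, minus the sliding-window sum of the previous k-1 slots' scale-ups.
-- outside the precondition, e.g. on solution([-5], 0, 1): A returns 0, B raises ZeroDivisionError
import Mathlib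
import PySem

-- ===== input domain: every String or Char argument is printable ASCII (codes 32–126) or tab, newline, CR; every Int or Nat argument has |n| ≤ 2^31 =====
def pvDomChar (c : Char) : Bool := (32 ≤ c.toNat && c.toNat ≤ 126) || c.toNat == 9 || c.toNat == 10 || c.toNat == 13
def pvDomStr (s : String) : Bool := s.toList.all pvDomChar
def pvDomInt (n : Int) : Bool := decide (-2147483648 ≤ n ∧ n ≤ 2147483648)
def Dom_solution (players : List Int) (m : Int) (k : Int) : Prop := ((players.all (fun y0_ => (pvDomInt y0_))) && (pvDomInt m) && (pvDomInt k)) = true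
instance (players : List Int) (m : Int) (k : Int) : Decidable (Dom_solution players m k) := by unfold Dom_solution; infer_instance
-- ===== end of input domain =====

-- B replaces A's repeated "+m until enough" simulation of the server array by one
-- pass computing the needed scale-ups per slot with floor division over a sliding
-- window of the previous k-1 slots' scale-ups (objective: faster).

-- ===== PORT A =====
-- inner 'for j in range(i, i+k): server[j] += m'
def addRange (server : List Int) (i k m : Int) : List Int :=
  (PySem.List.pyRange i (i + k) 1).foldl
    (fun s j => PySem.List.pySetD s j (PySem.List.pyGetD s j 0 + m)) server

-- the 'while server[i] <= players[i]' loop; fuel p.toNat+1 suffices on Pre_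
-- (each pass raises server[i] by m ≥ 1, so at most p passes run)
def aWhile (fuel : Nat) (server : List Int) (p : Int) (i k m : Int) (cnt : Int) :
    List Int × Int :=
  match fuel with
  | 0 => (server, cnt)
  | f + 1 =>
    if PySem.List.pyGetD server i 0 ≤ p then
      aWhile f (addRange server i k m) p i k m (cnt + 1)
    else (server, cnt)

def aStep (players : List Int) (k m : Int) (st : List Int × Int) (i : Int) :
    List Int × Int :=
  let p := PySem.List.pyGetD players i 0
  aWhile (p.toNat + 1) st.1 p i k m st.2

def solution (players : List Int) (m : Int) (k : Int) : Int :=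
  let server := List.replicate (24 + k).toNat m
  ((PySem.List.pyRange 0 (players.length : Int) 1).foldl (aStep players k m) (server, 0)).2

-- ===== PORT B =====
def bStep (m k : Int) (st : List Int × Int × Int) (p : Int) : List Int × Int × Int :=
  let adds := st.1
  let total := st.2.1
  let i := st.2.2
  let lo := if i - k + 1 < 0 then 0 else i - k + 1
  let cover := (PySem.List.slice adds (some lo) (some i)).sum
  let a0 := Int.fdiv p m - cover
  let a := if a0 < 0 then 0 else a0
  (adds ++ [a], total + a, i + 1)

def solution_alt (players : List Int) (m : Int) (k : Int) : Int :=
  (players.foldl (bStep m k) ([], 0, 0)).2.1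

-- ===== PRECONDITION & SPEC =====
-- Pre_ excludes m ≤ 0 (A's while loop can run forever and B divides by m), more
-- than 24 players (A can raise IndexError on the server list), and k ≤ 0 except
-- when no player count reaches m (otherwise A's while loop never terminates).
def Pre_solution (players : List Int) (m : Int) (k : Int) : Prop :=
  1 ≤ m ∧ players.length ≤ 24
    ∧ (1 ≤ k ∨ ((players.length : Int) ≤ 24 + k ∧ ∀ p ∈ players, p < m))
instance (players : List Int) (m : Int) (k : Int) : Decidable (Pre_solution players m k) := by
  unfold Pre_solution; infer_instance
def pvWitness_solution : List Int × Int × Int := ([10, 0, 7, 2], 3, 2)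

def Spec_solution (players : List Int) (m : Int) (k : Int) (out : Int) : Prop :=
  out = solution_alt players m k
instance (players : List Int) (m : Int) (k : Int) (out : Int) : Decidable (Spec_solution players m k out) := by
  unfold Spec_solution; infer_instance

-- ===== CLAIM (what is proved, stated in full; the proofs are below) =====
def Claim_equal_solution : Prop := ∀ (players : List Int) (m : Int) (k : Int),
  Dom_solution players m k → Pre_solution players m k →
  Spec_solution players m k (solution players m k)

-- ===== LEMMAS AND PROOFS =====

-- coverage of server slot idx by the recorded scale-ups 'adds' (adds[j] covers [j, j+k))
def cov (adds : List Int) (k : Int) (idx : Int) : Int :=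
  (adds.zipIdx.map (fun x => if (x.2 : Int) ≤ idx ∧ idx < (x.2 : Int) + k then x.1 else 0)).sum

lemma cov_nil (k idx : Int) : cov [] k idx = 0 := rfl

lemma cov_append (adds : List Int) (a k idx : Int) :
    cov (adds ++ [a]) k idx
      = cov adds k idx
        + (if (adds.length : Int) ≤ idx ∧ idx < (adds.length : Int) + k then a else 0) := by
  simp [cov, List.zipIdx_append]

lemma cov_nonneg (adds : List Int) (k idx : Int) (h : ∀ x ∈ adds, 0 ≤ x) :
    0 ≤ cov adds k idx := by
  apply List.sum_nonneg
  intro x hx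
  rcases List.mem_map.1 hx with ⟨y, hy, rfl⟩
  have : y.1 ∈ adds := by
    rcases List.mem_zipIdx hy with ⟨_, _, h2⟩
    exact h2 ▸ List.getElem_mem _
  split <;> simp [h _ this]

lemma zip_sum_drop (lo : Int) : ∀ (l : List Int) (s : Nat),
    ((l.zipIdx s).map (fun x => if lo ≤ (x.2 : Int) then x.1 else 0)).sum
      = (l.drop (lo - s).toNat).sum := by
  intro l
  induction l with
  | nil => simp
  | cons a t ih =>
    intro s
    rw [List.zipIdx_cons, List.map_cons, List.sum_cons, ih (s + 1)]
    by_cases h : lo ≤ (s : Int)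
    · have h0 : (lo - (s : Int)).toNat = 0 := by omega
      have h1 : (lo - ((s + 1 : Nat) : Int)).toNat = 0 := by push_cast; omega
      rw [h0, h1]
      simp [h]
    · have h0 : (lo - (s : Int)).toNat = (lo - ((s + 1 : Nat) : Int)).toNat + 1 := by
        push_cast; omega
      rw [h0]
      simp [h]

-- at the current slot i = adds.length, cov is exactly B's window sum
lemma cov_at_end (adds : List Int) (k : Int) (hk : 1 ≤ k) :
    cov adds k (adds.length : Int)
      = (PySem.List.slice adds
          (some (if (adds.length : Int) - k + 1 < 0 then 0 else (adds.length : Int) - k + 1))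
          (some (adds.length : Int))).sum := by
  set i : Int := (adds.length : Int) with hi
  set lo : Int := if i - k + 1 < 0 then 0 else i - k + 1 with hlo
  have hlo0 : 0 ≤ lo := by rw [hlo]; split <;> omega
  have hloi : lo ≤ i := by rw [hlo]; split <;> omega
  have h1 : cov adds k i
      = ((adds.zipIdx 0).map (fun x => if lo ≤ (x.2 : Int) then x.1 else 0)).sum := by
    unfold cov
    apply congrArg
    apply List.map_congr_left
    intro x hx
    obtain ⟨_, hxl, _⟩ := List.mem_zipIdx hx
    have hcond : ((x.2 : Int) ≤ i ∧ i < (x.2 : Int) + k) ↔ (lo ≤ (x.2 : Int)) := by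
      rw [hlo]; split_ifs <;> omega
    simp only [hcond]
  rw [h1, zip_sum_drop]
  rw [PySem.List.slice_toNat adds hlo0 (by omega)]
  rw [List.take_of_length_le (by simp [List.length_drop]; omega)]
  norm_num

-- m*(1+c) ≤ p ↔ c < p // m, for m ≥ 1
lemma le_iff_lt_fdiv (m p c : Int) (hm : 1 ≤ m) : m * (1 + c) ≤ p ↔ c < p.fdiv m := by
  rw [Int.fdiv_eq_ediv_of_nonneg _ (by omega), Int.lt_iff_add_one_le,
    Int.le_ediv_iff_mul_le (by omega : (0 : Int) < m)]
  have e : m * (1 + c) = (c + 1) * m := by ring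
  constructor <;> intro h <;> linarith

lemma fdiv_le_toNat (p m : Int) (hm : 1 ≤ m) : p.fdiv m ≤ (p.toNat : Int) := by
  rw [Int.fdiv_eq_ediv_of_nonneg _ (by omega)]
  by_cases hp : 0 ≤ p
  · have := Int.ediv_le_self m hp
    omega
  · have h1 := Int.emod_nonneg p (by omega : m ≠ 0)
    have h2 := Int.ediv_add_emod p m
    have hq : m * (p / m) < 0 := by omega
    have : p / m < 0 := by
      by_contra hcon
      push_neg at hcon
      have h4 : 0 ≤ m * (p / m) := mul_nonneg (by omega) hcon
      omega
    omega

-- effect of 'for j in range(a, b): server[j] += m' on length and every slot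
lemma rangeAdd (m : Int) : ∀ (n : Nat) (a b : Int) (s : List Int), 0 ≤ a →
    b ≤ (s.length : Int) → (b - a).toNat = n →
    (((PySem.List.pyRange a b 1).foldl
        (fun s j => PySem.List.pySetD s j (PySem.List.pyGetD s j 0 + m)) s).length = s.length
    ∧ ∀ idx : Nat,
        ((PySem.List.pyRange a b 1).foldl
          (fun s j => PySem.List.pySetD s j (PySem.List.pyGetD s j 0 + m)) s).getD idx 0
        = s.getD idx 0 + if a ≤ (idx : Int) ∧ (idx : Int) < b then m else 0) := by
  intro n
  induction n with
  | zero =>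
    intro a b s ha hb hn
    rw [PySem.List.pyRange_one_eq_nil (by omega)]
    refine ⟨rfl, ?_⟩
    intro idx
    have : ¬ (a ≤ (idx : Int) ∧ (idx : Int) < b) := by omega
    simp [this]
  | succ n ih =>
    intro a b s ha hb hn
    rw [PySem.List.pyRange_one_cons (by omega)]
    simp only [List.foldl_cons]
    have halen : a.toNat < s.length := by omega
    have hset : PySem.List.pySetD s a (PySem.List.pyGetD s a 0 + m)
        = s.set a.toNat (s.getD a.toNat 0 + m) := by
      rw [PySem.List.pySetD_of_nonneg _ _ ha, PySem.List.pyGetD_eq_getElem _ _ ha (by omega)]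
      congr 2
      exact (List.getD_eq_getElem s 0 halen).symm
    rw [hset]
    set s' := s.set a.toNat (s.getD a.toNat 0 + m) with hs'
    have hlen' : s'.length = s.length := by simp [hs']
    obtain ⟨hL, hG⟩ := ih (a + 1) b s' (by omega) (by omega) (by omega)
    refine ⟨by rw [hL, hlen'], ?_⟩
    intro idx
    rw [hG idx]
    have hgd : s'.getD idx 0 = if idx = a.toNat then s.getD a.toNat 0 + m else s.getD idx 0 := by
      by_cases hi : idx = a.toNat
      · subst hi; simp [hs', List.getD, halen]
      · simp [hs', List.getD, hi, Ne.symm hi]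
    rw [hgd]
    by_cases hi : idx = a.toNat
    · subst hi
      have h1 : ¬ (a + 1 ≤ (a.toNat : Int) ∧ (a.toNat : Int) < b) := by omega
      have h2 : a ≤ (a.toNat : Int) ∧ (a.toNat : Int) < b := by omega
      rw [if_pos rfl, if_neg h1, if_pos h2]
      ring
    · have hiff : (a + 1 ≤ (idx : Int) ∧ (idx : Int) < b) ↔ (a ≤ (idx : Int) ∧ (idx : Int) < b) := by
        omega
      rw [if_neg hi]
      simp only [hiff]

lemma addRange_spec (server : List Int) (i k m : Int) (h0 : 0 ≤ i)
    (hb : i + k ≤ (server.length : Int)) :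
    (addRange server i k m).length = server.length
    ∧ ∀ idx : Nat, (addRange server i k m).getD idx 0
        = server.getD idx 0 + if i ≤ (idx : Int) ∧ (idx : Int) < i + k then m else 0 := by
  unfold addRange
  exact rangeAdd m (i + k - i).toNat i (i + k) server h0 hb rfl

-- full characterisation of the while loop at slot i with current coverage c
lemma aWhile_spec (m k : Int) (hm : 1 ≤ m) (hk : 1 ≤ k) :
    ∀ (fuel : Nat) (server : List Int) (p : Int) (i : Nat) (c cnt : Int),
    (i : Int) + k ≤ (server.length : Int) →
    server.getD i 0 = m * (1 + c) →
    p.fdiv m - c < (fuel : Int) →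
    (aWhile fuel server p (i : Int) k m cnt).2 = cnt + max 0 (p.fdiv m - c)
    ∧ (aWhile fuel server p (i : Int) k m cnt).1.length = server.length
    ∧ ∀ idx : Nat, (aWhile fuel server p (i : Int) k m cnt).1.getD idx 0
        = server.getD idx 0
          + (if (i : Int) ≤ (idx : Int) ∧ (idx : Int) < (i : Int) + k
              then m * max 0 (p.fdiv m - c) else 0) := by
  intro fuel
  induction fuel with
  | zero =>
    intro server p i c cnt hik hgd hfuel
    have ht : max 0 (p.fdiv m - c) = 0 := by omega
    rw [ht]
    exact ⟨by simp [aWhile], by simp [aWhile], by intro idx; simp [aWhile]⟩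
  | succ f ih =>
    intro server p i c cnt hik hgd hfuel
    have hilen : (i : Int) < (server.length : Int) := by omega
    have hgetp : PySem.List.pyGetD server (i : Int) 0 = m * (1 + c) := by
      rw [PySem.List.pyGetD_eq_getElem _ _ (by omega) hilen]
      simp only [Int.toNat_natCast]
      rw [← List.getD_eq_getElem server 0 (by omega : i < server.length)]
      exact hgd
    by_cases hcond : m * (1 + c) ≤ p
    · have hc : c < p.fdiv m := (le_iff_lt_fdiv m p c hm).1 hcond
      have hstep : aWhile (f + 1) server p (i : Int) k m cnt
          = aWhile f (addRange server (i : Int) k m) p (i : Int) k m (cnt + 1) := by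
        simp [aWhile, hgetp, hcond]
      obtain ⟨hL, hG⟩ := addRange_spec server (i : Int) k m (by omega) (by omega)
      have hgd' : (addRange server (i : Int) k m).getD i 0 = m * (1 + (c + 1)) := by
        rw [hG i, hgd,
          if_pos (show (i : Int) ≤ (i : Int) ∧ (i : Int) < (i : Int) + k by omega)]
        ring
      obtain ⟨ih1, ih2, ih3⟩ := ih (addRange server (i : Int) k m) p i (c + 1) (cnt + 1)
        (by omega) hgd' (by push_cast at hfuel ⊢; omega)
      have htt : max 0 (p.fdiv m - (c + 1)) = max 0 (p.fdiv m - c) - 1 := by omega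
      refine ⟨?_, ?_, ?_⟩
      · rw [hstep, ih1, htt]; ring
      · rw [hstep, ih2, hL]
      · intro idx
        rw [hstep, ih3 idx, hG idx, htt]
        by_cases hidx : (i : Int) ≤ (idx : Int) ∧ (idx : Int) < (i : Int) + k
        · rw [if_pos hidx, if_pos hidx, if_pos hidx]
          ring
        · rw [if_neg hidx, if_neg hidx, if_neg hidx]
          ring
    · have hc : ¬ c < p.fdiv m := fun h => hcond ((le_iff_lt_fdiv m p c hm).2 h)
      have ht : max 0 (p.fdiv m - c) = 0 := by omega
      have hret : aWhile (f + 1) server p (i : Int) k m cnt = (server, cnt) := by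
        simp [aWhile, hgetp, hcond]
      rw [hret, ht]
      exact ⟨by simp, rfl, by intro idx; simp⟩

-- the joint induction: A's remaining outer loop equals B's remaining fold
lemma loop_eq (m k : Int) (hm : 1 ≤ m) (hk : 1 ≤ k) (players : List Int)
    (hp24 : players.length ≤ 24) :
    ∀ (rest : List Int) (i : Nat) (server adds : List Int) (acc : Int),
    players.drop i = rest →
    server.length = (24 + k).toNat →
    (∀ idx : Nat, idx < server.length → server.getD idx 0 = m * (1 + cov adds k idx)) →
    adds.length = i →
    (∀ x ∈ adds, 0 ≤ x) →
    ((PySem.List.pyRange (i : Int) (players.length : Int) 1).foldl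
        (aStep players k m) (server, acc)).2
      = (rest.foldl (bStep m k) (adds, acc, (i : Int))).2.1 := by
  intro rest
  induction rest with
  | nil =>
    intro i server adds acc hdrop hslen hinv hadds hnn
    have : players.length ≤ i := by
      have := congrArg List.length hdrop
      simp [List.length_drop] at this
      omega
    rw [PySem.List.pyRange_one_eq_nil (by exact_mod_cast this)]
    rfl
  | cons p rest' ih =>
    intro i server adds acc hdrop hslen hinv hadds hnn
    subst hadds
    have hlt : adds.length < players.length := by
      have := congrArg List.length hdrop
      simp [List.length_drop] at this
      omega
    have hslen24 : 25 ≤ server.length := by rw [hslen]; omega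
    rw [PySem.List.pyRange_one_cons (by exact_mod_cast hlt)]
    simp only [List.foldl_cons]
    -- the current player count
    have hgp : PySem.List.pyGetD players (adds.length : Int) 0 = p := by
      rw [PySem.List.pyGetD_eq_getElem _ _ (by omega) (by exact_mod_cast hlt)]
      have h0 : (players.drop adds.length)[0]'(by simp [hdrop]) = p := by simp [hdrop]
      rw [List.getElem_drop] at h0
      simpa using h0
    set c : Int := cov adds k (adds.length : Int) with hc
    have hcnn : 0 ≤ c := cov_nonneg _ _ _ hnn
    -- A's step via the while characterisation
    have hfd := fdiv_le_toNat p m hm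
    obtain ⟨w1, w2, w3⟩ := aWhile_spec m k hm hk (p.toNat + 1) server p adds.length c acc
      (by omega) (hinv adds.length (by omega)) (by push_cast; omega)
    set t : Int := max 0 (p.fdiv m - c) with htdef
    have hA : aStep players k m (server, acc) (adds.length : Int)
        = ((aWhile (p.toNat + 1) server p (adds.length : Int) k m acc).1, acc + t) := by
      simp only [aStep, hgp]
      exact Prod.ext rfl w1
    -- B's step
    have hB : bStep m k (adds, acc, (adds.length : Int)) p
        = (adds ++ [t], acc + t, (adds.length : Int) + 1) := by
      simp only [bStep]
      rw [← cov_at_end adds k hk, ← hc]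
      have : (if p.fdiv m - c < 0 then 0 else p.fdiv m - c) = t := by
        rw [htdef]; split <;> omega
      rw [this]
    rw [hA, hB]
    -- re-establish the invariant and recurse
    set server' := (aWhile (p.toNat + 1) server p (adds.length : Int) k m acc).1 with hs'
    have hinv' : ∀ idx : Nat, idx < server'.length →
        server'.getD idx 0 = m * (1 + cov (adds ++ [t]) k idx) := by
      intro idx hidx
      rw [hs', w2] at hidx
      rw [hs', w3 idx, hinv idx hidx, cov_append]
      by_cases hidx : (adds.length : Int) ≤ (idx : Int) ∧ (idx : Int) < (adds.length : Int) + k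
      · rw [if_pos hidx, if_pos hidx]
        ring
      · rw [if_neg hidx, if_neg hidx]
        ring
    have := ih (adds.length + 1) server' (adds ++ [t]) (acc + t)
      (by rw [← List.drop_drop, hdrop]; rfl)
      (by rw [hs', w2, hslen])
      hinv'
      (by simp)
      (by intro x hx
          rcases List.mem_append.1 hx with h | h
          · exact hnn x h
          · simp at h; omega)
    push_cast at this ⊢
    exact this

lemma fdiv_nonpos_of_lt (p m : Int) (hm : 1 ≤ m) (h : p < m) : p.fdiv m ≤ 0 := by
  rw [Int.fdiv_eq_ediv_of_nonneg _ (by omega)]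
  by_cases hp : 0 ≤ p
  · rw [Int.ediv_eq_zero_of_lt hp (by omega)]
  · have h1 := Int.emod_nonneg p (by omega : m ≠ 0)
    have h2 := Int.ediv_add_emod p m
    have hq : m * (p / m) < 0 := by omega
    by_contra hcon
    push_neg at hcon
    have h3 : 0 ≤ m * (p / m) := mul_nonneg (by omega) (by omega)
    omega

-- when no player count reaches m, A's outer loop never scales up
lemma a_triv (m k : Int) (players : List Int) (hlen : (players.length : Int) ≤ 24 + k)
    (hsmall : ∀ p ∈ players, p < m) :
    ∀ (rest : List Int) (i : Nat) (acc : Int), players.drop i = rest →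
    ((PySem.List.pyRange (i : Int) (players.length : Int) 1).foldl
        (aStep players k m) (List.replicate (24 + k).toNat m, acc)).2 = acc := by
  intro rest
  induction rest with
  | nil =>
    intro i acc hdrop
    have : players.length ≤ i := by
      have := congrArg List.length hdrop
      simp [List.length_drop] at this
      omega
    rw [PySem.List.pyRange_one_eq_nil (by exact_mod_cast this)]
    rfl
  | cons p rest' ih =>
    intro i acc hdrop
    have hlt : i < players.length := by
      have := congrArg List.length hdrop
      simp [List.length_drop] at this
      omega
    rw [PySem.List.pyRange_one_cons (by exact_mod_cast hlt)]
    simp only [List.foldl_cons]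
    have hgp : PySem.List.pyGetD players (i : Int) 0 = p := by
      rw [PySem.List.pyGetD_eq_getElem _ _ (by omega) (by exact_mod_cast hlt)]
      have h0 : (players.drop i)[0]'(by simp [hdrop]) = p := by simp [hdrop]
      rw [List.getElem_drop] at h0
      simpa using h0
    have hpm : p < m := hsmall p (by
      have : p ∈ players.drop i := by rw [hdrop]; exact List.mem_cons_self
      exact List.mem_of_mem_drop this)
    have hgs : PySem.List.pyGetD (List.replicate (24 + k).toNat m) (i : Int) 0 = m := by
      rw [PySem.List.pyGetD_eq_getElem _ _ (by omega)
        (by simp [List.length_replicate]; omega)]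
      exact List.getElem_replicate _
    have hstep : aStep players k m (List.replicate (24 + k).toNat m, acc) (i : Int)
        = (List.replicate (24 + k).toNat m, acc) := by
      have hnle : ¬ m ≤ p := by omega
      simp [aStep, hgp, aWhile, hgs, hnle]
    rw [hstep]
    have := ih (i + 1) acc (by rw [← List.drop_drop, hdrop]; rfl)
    push_cast at this ⊢
    exact this

-- and B computes 0 for every such slot
lemma b_triv (m k : Int) (hm : 1 ≤ m) :
    ∀ (rest adds : List Int) (acc i : Int), (∀ p ∈ rest, p < m) → (∀ x ∈ adds, 0 ≤ x) →
    (rest.foldl (bStep m k) (adds, acc, i)).2.1 = acc := by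
  intro rest
  induction rest with
  | nil => intro adds acc i _ _; rfl
  | cons p rest' ih =>
    intro adds acc i hsmall hnn
    simp only [List.foldl_cons]
    have hcov : 0 ≤ (PySem.List.slice adds
        (some (if i - k + 1 < 0 then 0 else i - k + 1)) (some i)).sum := by
      apply List.sum_nonneg
      intro x hx
      exact hnn x (PySem.List.mem_of_mem_slice _ _ _ hx)
    have hfd := fdiv_nonpos_of_lt p m hm (hsmall p List.mem_cons_self)
    set cv : Int := (PySem.List.slice adds
        (some (if i - k + 1 < 0 then 0 else i - k + 1)) (some i)).sum with hcv
    have hB : bStep m k (adds, acc, i) p = (adds ++ [0], acc + 0, i + 1) := by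
      simp only [bStep]
      rw [← hcv, show (if p.fdiv m - cv < 0 then 0 else p.fdiv m - cv) = (0 : Int) by
        split <;> omega]
    rw [hB]
    have := ih (adds ++ [0]) (acc + 0) (i + 1)
      (fun q hq => hsmall q (List.mem_cons_of_mem _ hq))
      (by intro x hx
          rcases List.mem_append.1 hx with h | h
          · exact hnn x h
          · simp at h; omega)
    simpa using this

-- getD on the initial all-m server list
lemma replicate_getD (n : Nat) (m : Int) (idx : Nat) :
    (List.replicate n m).getD idx 0 = if idx < n then m else 0 := by
  simp [List.getD, List.getElem?_replicate]
  split <;> simp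

-- ===== VERDICT (by name: the statement is the Claim_ definition above) =====
theorem solution_spec : Claim_equal_solution := by
  intro players m k _ hpre
  obtain ⟨hm, hp24, hk | ⟨hlen, hsmall⟩⟩ := hpre
  · unfold Spec_solution solution solution_alt
    have h := loop_eq m k hm hk players hp24 players 0 (List.replicate (24 + k).toNat m) [] 0
      (by simp)
      (by simp)
      (by intro idx hidx
          rw [replicate_getD, cov_nil, if_pos (by simpa using hidx)]
          ring)
      rfl
      (by simp)
    simpa using h
  · unfold Spec_solution solution solution_alt
    have hA := a_triv m k players hlen hsmall players 0 0 (by simp)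
    have hB := b_triv m k hm players [] 0 0 hsmall (by simp)
    simp only [Nat.cast_zero] at hA
    rw [hA, hB]
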